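-- pv_equiv track=rewrite | github.com/HemanthKumar-2006/srm-ktr-admission-chatbot | backend/sitemap_crawler.py | sort_urls
-- ===== SOURCE A (Python) =====
-- IMPORTANT_KEYWORDS = [
--     "admission", "fee", "tuition", "btech",
--     "engineering", "hostel", "campus",
--     "course", "ktr",
-- ]
--
-- def sort_urls(urls):
--     priority = []
--     normal = []
--
--     for u in urls:
--         if any(k in u.lower() for k in IMPORTANT_KEYWORDS):
--             priority.append(u)
--         else:
--             normal.append(u)
--
--     return priority + normal
-- ===== SOURCE B (Python) =====
-- IMPORTANT_KEYWORDS = [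
--     "admission", "fee", "tuition", "btech",
--     "engineering", "hostel", "campus",
--     "course", "ktr",
-- ]
--
-- def sort_urls(urls):
--     # single stable sort on a binary key: priority items (key 0) come first,
--     # original relative order preserved within each group
--     return sorted(urls, key=lambda u: 0 if any(k in u.lower() for k in IMPORTANT_KEYWORDS) else 1)
-- ===== Notes on version B (the rewrite author's own statement) =====
-- stated objective: idiomatic
-- what changed: Replaces the explicit two-accumulator partition loop with a single stable sort on a binary key (0 for keyword-matching URLs, 1 otherwise); stability makes it return exactly priority + normal.
import Mathlib
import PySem

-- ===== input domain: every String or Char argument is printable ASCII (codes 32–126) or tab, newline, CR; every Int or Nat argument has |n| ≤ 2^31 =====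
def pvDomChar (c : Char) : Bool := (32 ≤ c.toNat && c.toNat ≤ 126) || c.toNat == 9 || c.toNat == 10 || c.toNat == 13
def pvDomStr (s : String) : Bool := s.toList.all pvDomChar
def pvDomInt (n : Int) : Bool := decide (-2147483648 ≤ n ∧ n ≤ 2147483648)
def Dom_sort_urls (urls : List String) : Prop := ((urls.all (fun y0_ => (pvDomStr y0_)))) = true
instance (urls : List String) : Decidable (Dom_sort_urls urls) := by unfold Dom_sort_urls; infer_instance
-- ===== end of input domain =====

-- B replaces A's two-accumulator partition loop with one stable sort on a binary key (idiomatic; same return value).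

-- ===== PORT A =====
def pvKeywords : List String :=
  ["admission", "fee", "tuition", "btech", "engineering", "hostel", "campus", "course", "ktr"]

-- any(k in u.lower() for k in IMPORTANT_KEYWORDS)
def pvImportant (u : String) : Bool :=
  pvKeywords.any (fun k => PySem.Str.isIn k (PySem.Str.lower u))

def sort_urls (urls : List String) : List String :=
  let pn := urls.foldl
    (fun (acc : List String × List String) u =>
      if pvImportant u then (acc.1 ++ [u], acc.2) else (acc.1, acc.2 ++ [u]))
    ([], [])
  pn.1 ++ pn.2

-- ===== PORT B =====
def sort_urls_alt (urls : List String) : List String :=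
  PySem.List.sorted urls (fun u => if pvImportant u then (0 : Int) else 1) false

-- ===== PRECONDITION & SPEC =====
def Spec_sort_urls (urls : List String) (out : List String) : Prop := out = sort_urls_alt urls
instance (urls : List String) (out : List String) : Decidable (Spec_sort_urls urls out) := by unfold Spec_sort_urls; infer_instance

-- ===== CLAIM (what is proved, stated in full; the proofs are below) =====
def Claim_equal_sort_urls : Prop := ∀ (urls : List String), Dom_sort_urls urls → Spec_sort_urls urls (sort_urls urls)

-- ===== LEMMAS AND PROOFS =====

-- A's loop appends each element to the matching accumulator: it computes the two filters.
theorem sort_urls_foldl_eq (c : String → Bool) :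
    ∀ (urls p n : List String),
      urls.foldl
        (fun (acc : List String × List String) u =>
          if c u then (acc.1 ++ [u], acc.2) else (acc.1, acc.2 ++ [u])) (p, n)
      = (p ++ urls.filter c, n ++ urls.filter (fun u => !c u)) := by
  intro urls
  induction urls with
  | nil => intro p n; simp
  | cons x xs ih =>
    intro p n
    by_cases hx : c x = true <;> simp [List.foldl_cons, hx, ih, List.append_assoc]

-- inserting a key-0 element lands exactly at the zeros/ones boundary
theorem insertBy_binary_zero (c : String → Bool) (x : String) (hx : c x = true) :
    ∀ (P N : List String), (∀ y ∈ P, c y = true) → (∀ y ∈ N, c y = false) →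
      PySem.List.insertBy
        (fun a b => decide ((if c a then (0 : Int) else 1) < (if c b then (0 : Int) else 1)))
        x (P ++ N) = P ++ x :: N := by
  intro P
  induction P with
  | nil =>
    intro N _ hN
    cases N with
    | nil => simp [PySem.List.insertBy]
    | cons m rest =>
      have hm : c m = false := hN m (by simp)
      simp [PySem.List.insertBy, hx, hm]
  | cons p ps ih =>
    intro N hP hN
    have hp : c p = true := hP p (by simp)
    have : PySem.List.insertBy
        (fun a b => decide ((if c a then (0 : Int) else 1) < (if c b then (0 : Int) else 1)))
        x (ps ++ N) = ps ++ x :: N := ih N (fun y hy => hP y (by simp [hy])) hN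
    simp [PySem.List.insertBy, hx, hp, this]

-- inserting a key-1 element appends at the end
theorem insertBy_binary_one (c : String → Bool) (x : String) (hx : c x = false)
    (ys : List String) :
    PySem.List.insertBy
      (fun a b => decide ((if c a then (0 : Int) else 1) < (if c b then (0 : Int) else 1)))
      x ys = ys ++ [x] := by
  apply PySem.List.insertBy_of_forall_not_before
  intro y _
  by_cases hy : c y = true <;> simp [hx, hy]

-- stable sort on the binary key computes filter-true ++ filter-false
theorem sorted_binary_eq_partition (c : String → Bool) :
    ∀ (urls acc : List String),
      (∃ P N, acc = P ++ N ∧ (∀ y ∈ P, c y = true) ∧ (∀ y ∈ N, c y = false)) →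
      urls.foldl
        (fun acc x => PySem.List.insertBy
          (fun a b => decide ((if c a then (0 : Int) else 1) < (if c b then (0 : Int) else 1)))
          x acc) acc
      = (acc ++ urls).filter c ++ (acc ++ urls).filter (fun u => !c u) := by
  intro urls
  induction urls with
  | nil =>
    intro acc ⟨P, N, hacc, hP, hN⟩
    have h1 : P.filter c = P := List.filter_eq_self.mpr (fun y hy => by simp [hP y hy])
    have h2 : N.filter c = [] := List.filter_eq_nil_iff.mpr (fun y hy => by simp [hN y hy])
    have h3 : P.filter (fun u => !c u) = [] :=
      List.filter_eq_nil_iff.mpr (fun y hy => by simp [hP y hy])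
    have h4 : N.filter (fun u => !c u) = N :=
      List.filter_eq_self.mpr (fun y hy => by simp [hN y hy])
    rw [hacc]
    simp [List.filter_append, h1, h2, h3, h4]
  | cons x xs ih =>
    intro acc ⟨P, N, hacc, hP, hN⟩
    have h2 : N.filter c = [] := List.filter_eq_nil_iff.mpr (fun y hy => by simp [hN y hy])
    have h3 : P.filter (fun u => !c u) = [] :=
      List.filter_eq_nil_iff.mpr (fun y hy => by simp [hP y hy])
    rw [List.foldl_cons]
    by_cases hx : c x = true
    · rw [hacc, insertBy_binary_zero c x hx P N hP hN]
      have hstep : P ++ x :: N = (P ++ [x]) ++ N := by simp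
      rw [hstep, ih ((P ++ [x]) ++ N)
        ⟨P ++ [x], N, rfl,
          (by intro y hy; rcases List.mem_append.mp hy with h | h
              · exact hP y h
              · simp at h; subst h; exact hx),
          hN⟩]
      simp [List.filter_append, hx, h2, h3]
    · rw [hacc, insertBy_binary_one c x (by simpa using hx) (P ++ N)]
      have hstep : (P ++ N) ++ [x] = P ++ (N ++ [x]) := by simp
      rw [hstep, ih (P ++ (N ++ [x]))
        ⟨P, N ++ [x], rfl, hP,
          (by intro y hy; rcases List.mem_append.mp hy with h | h
              · exact hN y h
              · simp at h; subst h; simpa using hx)⟩]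
      simp [List.filter_append, hx, h2, h3]

-- ===== VERDICT (by name: the statement is the Claim_ definition above) =====
theorem sort_urls_spec : Claim_equal_sort_urls := by
  intro urls _
  unfold Spec_sort_urls sort_urls sort_urls_alt
  rw [PySem.List.sorted_eq_foldl_insertBy]
  rw [sort_urls_foldl_eq pvImportant urls [] []]
  rw [sorted_binary_eq_partition pvImportant urls [] ⟨[], [], rfl, by simp, by simp⟩]
  simp
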